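-- pv_equiv track=rewrite | github.com/glebpav/Ehrlich | ehrlich/segment.py | _get_neighbour_data
-- ===== SOURCE A (Python) =====
-- def _get_neighbour_data(old_points_idxs, faces_list, points_list, used_points, used_faces):
--     neig_points, neig_faces = set(), set()
--     for point_idx in old_points_idxs:
--         filtered_faces = list(filter(lambda item: item not in used_faces, faces_list[point_idx]))
--         neig_faces.update(filtered_faces)
--         for face_idx in filtered_faces:
--             face = points_list[face_idx]
--             face = list(filter(lambda item: item not in used_points, face))
--             neig_points.update(face)
--     return neig_faces, neig_points
-- ===== SOURCE B (Python) =====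
-- def _get_neighbour_data(old_points_idxs, faces_list, points_list, used_points, used_faces):
--     # Pass 1: collect every unused neighbouring face of the given points.
--     neig_faces = set()
--     for point_idx in old_points_idxs:
--         for face_idx in faces_list[point_idx]:
--             if face_idx not in used_faces:
--                 neig_faces.add(face_idx)
--     # Pass 2: walk the finished face set once and collect its unused points.
--     neig_points = set()
--     for face_idx in neig_faces:
--         for p in points_list[face_idx]:
--             if p not in used_points:
--                 neig_points.add(p)
--     return neig_faces, neig_points
-- ===== Notes on version B (the rewrite author's own statement) =====
-- stated objective: alternative
-- what changed: Replaces the nested loop (which re-filters and re-visits the point lists of a face once per point that touches it) by two independent passes: first build the complete neig_faces set, then traverse that deduplicated set once to gather neig_points, adding elements one by one instead of filter+update.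
import Mathlib
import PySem

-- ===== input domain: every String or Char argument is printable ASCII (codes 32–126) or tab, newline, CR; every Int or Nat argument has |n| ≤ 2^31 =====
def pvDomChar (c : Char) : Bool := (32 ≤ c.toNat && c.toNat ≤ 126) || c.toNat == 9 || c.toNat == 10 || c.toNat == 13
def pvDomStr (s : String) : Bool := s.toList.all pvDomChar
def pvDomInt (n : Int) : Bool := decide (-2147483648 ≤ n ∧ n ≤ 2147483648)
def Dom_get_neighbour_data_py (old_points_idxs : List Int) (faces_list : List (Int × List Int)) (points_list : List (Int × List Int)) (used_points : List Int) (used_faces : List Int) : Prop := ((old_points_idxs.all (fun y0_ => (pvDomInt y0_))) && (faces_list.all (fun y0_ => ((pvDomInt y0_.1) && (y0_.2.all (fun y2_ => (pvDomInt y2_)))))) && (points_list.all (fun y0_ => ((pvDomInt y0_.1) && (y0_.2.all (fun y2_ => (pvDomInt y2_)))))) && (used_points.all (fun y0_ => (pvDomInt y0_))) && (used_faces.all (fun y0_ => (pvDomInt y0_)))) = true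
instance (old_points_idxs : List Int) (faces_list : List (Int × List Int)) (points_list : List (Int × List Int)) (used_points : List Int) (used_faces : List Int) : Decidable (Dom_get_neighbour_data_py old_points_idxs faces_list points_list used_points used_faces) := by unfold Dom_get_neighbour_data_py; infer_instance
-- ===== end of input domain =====

-- B replaces A's nested filter-and-update loop by two independent passes: build the full
-- neig_faces set first, then traverse that deduplicated set once to gather neig_points
-- (objective: alternative decomposition, same asymptotic cost).

-- ===== PORT A =====
def get_neighbour_data_py (old_points_idxs : List Int) (faces_list : List (Int × List Int)) (points_list : List (Int × List Int)) (used_points : List Int) (used_faces : List Int) : List Int × List Int :=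
  -- neig_points, neig_faces = set(), set(); for point_idx in old_points_idxs: …
  let st :=
    old_points_idxs.foldl
      (fun (st : PySem.Set Int × PySem.Set Int) point_idx =>
        -- faces_list[point_idx] is a dict lookup; KeyError excluded by Pre_ (getD is its total form)
        let filtered_faces := (PySem.Dict.getD (PySem.Dict.ofList faces_list) point_idx []).filter (fun item => !(used_faces.contains item))
        let neig_faces := PySem.Set.update st.2 filtered_faces
        let neig_points :=
          filtered_faces.foldl
            (fun np face_idx =>
              PySem.Set.update np ((PySem.Dict.getD (PySem.Dict.ofList points_list) face_idx []).filter (fun item => !(used_points.contains item))))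
            st.1
        (neig_points, neig_faces))
      (PySem.Set.empty, PySem.Set.empty)
  (st.2, st.1)

-- ===== PORT B =====
def get_neighbour_data_py_alt (old_points_idxs : List Int) (faces_list : List (Int × List Int)) (points_list : List (Int × List Int)) (used_points : List Int) (used_faces : List Int) : List Int × List Int :=
  -- pass 1: every unused neighbouring face
  let neig_faces :=
    old_points_idxs.foldl
      (fun nf point_idx =>
        (PySem.Dict.getD (PySem.Dict.ofList faces_list) point_idx []).foldl
          (fun nf face_idx => if used_faces.contains face_idx then nf else PySem.Set.add nf face_idx)
          nf)
      PySem.Set.empty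
  -- pass 2: walk the finished face set once
  let neig_points :=
    neig_faces.foldl
      (fun np face_idx =>
        (PySem.Dict.getD (PySem.Dict.ofList points_list) face_idx []).foldl
          (fun np p => if used_points.contains p then np else PySem.Set.add np p)
          np)
      PySem.Set.empty
  (neig_faces, neig_points)

-- ===== PRECONDITION & SPEC =====
-- Pre_ excludes exactly the inputs on which Python A raises KeyError: a point index missing
-- from faces_list, or an unused face index missing from points_list (B raises there too).
def Pre_get_neighbour_data_py (old_points_idxs : List Int) (faces_list : List (Int × List Int)) (points_list : List (Int × List Int)) (used_points : List Int) (used_faces : List Int) : Prop :=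
  (∀ p ∈ old_points_idxs, (PySem.Dict.get? (PySem.Dict.ofList faces_list) p).isSome = true) ∧
  (∀ p ∈ old_points_idxs, ∀ f ∈ PySem.Dict.getD (PySem.Dict.ofList faces_list) p [],
      used_faces.contains f = false → (PySem.Dict.get? (PySem.Dict.ofList points_list) f).isSome = true)
instance (old_points_idxs : List Int) (faces_list : List (Int × List Int)) (points_list : List (Int × List Int)) (used_points : List Int) (used_faces : List Int) : Decidable (Pre_get_neighbour_data_py old_points_idxs faces_list points_list used_points used_faces) := by unfold Pre_get_neighbour_data_py; infer_instance
def pvWitness_get_neighbour_data_py : List Int × (List (Int × List Int)) × (List (Int × List Int)) × List Int × List Int :=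
  ([0, 1], [(0, [5, 6]), (1, [6])], [(5, [0, 2]), (6, [1, 3])], [1], [5])

def Spec_get_neighbour_data_py (old_points_idxs : List Int) (faces_list : List (Int × List Int)) (points_list : List (Int × List Int)) (used_points : List Int) (used_faces : List Int) (out : List Int × List Int) : Prop := out = get_neighbour_data_py_alt old_points_idxs faces_list points_list used_points used_faces
instance (old_points_idxs : List Int) (faces_list : List (Int × List Int)) (points_list : List (Int × List Int)) (used_points : List Int) (used_faces : List Int) (out : List Int × List Int) : Decidable (Spec_get_neighbour_data_py old_points_idxs faces_list points_list used_points used_faces out) := by unfold Spec_get_neighbour_data_py; infer_instance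

-- ===== CLAIM (what is proved, stated in full; the proofs are below) =====
def Claim_equal_get_neighbour_data_py : Prop := ∀ (old_points_idxs : List Int) (faces_list : List (Int × List Int)) (points_list : List (Int × List Int)) (used_points : List Int) (used_faces : List Int), Dom_get_neighbour_data_py old_points_idxs faces_list points_list used_points used_faces → Pre_get_neighbour_data_py old_points_idxs faces_list points_list used_points used_faces → Spec_get_neighbour_data_py old_points_idxs faces_list points_list used_points used_faces (get_neighbour_data_py old_points_idxs faces_list points_list used_points used_faces)

-- ===== LEMMAS AND PROOFS =====

theorem pv_A_loop (fl pl : List (Int × List Int)) (up uf : List Int) :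
    ∀ (opi : List Int) (a b : PySem.Set Int),
      opi.foldl (fun (st : PySem.Set Int × PySem.Set Int) point_idx =>
          (List.foldl (fun np face_idx =>
              PySem.Set.update np (List.filter (fun item => !up.contains item) ((PySem.Dict.ofList pl).getD face_idx [])))
            st.1 (List.filter (fun item => !uf.contains item) ((PySem.Dict.ofList fl).getD point_idx [])),
           PySem.Set.update st.2 (List.filter (fun item => !uf.contains item) ((PySem.Dict.ofList fl).getD point_idx []))))
        (a, b)
      = (opi.foldl (fun np point_idx =>
            List.foldl (fun np face_idx =>
              PySem.Set.update np (List.filter (fun item => !up.contains item) ((PySem.Dict.ofList pl).getD face_idx [])))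
              np (List.filter (fun item => !uf.contains item) ((PySem.Dict.ofList fl).getD point_idx []))) a,
         opi.foldl (fun nf point_idx =>
            PySem.Set.update nf (List.filter (fun item => !uf.contains item) ((PySem.Dict.ofList fl).getD point_idx []))) b) := by
  intro opi
  induction opi with
  | nil => intro a b; rfl
  | cons x t ih => intro a b; simpa using ih _ _

-- 'for x in l: if c x: skip else s.add(x)'  =  s.update(filter)
theorem pv_foldl_ite_add (c : Int → Bool) (l : List Int) (s : PySem.Set Int) :
    l.foldl (fun s x => if c x then s else PySem.Set.add s x) s
      = PySem.Set.update s (l.filter (fun x => !(c x))) := by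
  induction l generalizing s with
  | nil => simp [PySem.Set.update]
  | cons x t ih =>
    by_cases h : c x = true
    · simp [h, ih]
    · simp only [List.foldl_cons, List.filter_cons]
      simp [h, ih, PySem.Set.update_cons]

theorem pv_foldl_nested_flat {α : Type} (g : Int → List Int) (f : α → Int → α) :
    ∀ (l : List Int) (s : α),
      l.foldl (fun s p => (g p).foldl f s) s = (l.flatMap g).foldl f s := by
  intro l
  induction l with
  | nil => intro s; rfl
  | cons x t ih => intro s; simp [List.foldl_append, ih]

theorem pv_foldl_update_flat (g : Int → List Int) :
    ∀ (l : List Int) (s : PySem.Set Int),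
      l.foldl (fun s p => PySem.Set.update s (g p)) s = PySem.Set.update s (l.flatMap g) := by
  intro l
  induction l with
  | nil => intro s; simp [PySem.Set.update]
  | cons x t ih => intro s; simp [ih, PySem.Set.update_append]

theorem pv_update_of_subset (s : PySem.Set Int) (l : List Int) (h : ∀ y ∈ l, y ∈ s) :
    PySem.Set.update s l = s := by
  rw [PySem.Set.update_eq_append_filter]
  have he : (PySem.Set.ofList l).filter (fun y => !(PySem.Set.contains s y)) = [] := by
    rw [List.filter_eq_nil_iff]
    intro y hy
    have hys : y ∈ s := h y (by simpa [PySem.Set.mem_ofList] using hy)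
    simpa using hys
  rw [he, List.append_nil]

theorem pv_mem_foldl_update (g : Int → List Int) :
    ∀ (l : List Int) (P : PySem.Set Int) (y : Int), y ∈ P →
      y ∈ l.foldl (fun np f => PySem.Set.update np (g f)) P := by
  intro l
  induction l with
  | nil => intro P y hy; exact hy
  | cons x t ih =>
    intro P y hy
    exact ih _ y (by simp [PySem.Set.mem_update, hy])

theorem pv_pts_mem_foldl_update (g : Int → List Int) :
    ∀ (l : List Int) (P : PySem.Set Int) (x : Int), x ∈ l →
      ∀ y ∈ g x, y ∈ l.foldl (fun np f => PySem.Set.update np (g f)) P := by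
  intro l
  induction l with
  | nil => intro P x hx; cases hx
  | cons z t ih =>
    intro P x hx y hy
    rcases List.mem_cons.1 hx with rfl | hx
    · exact pv_mem_foldl_update g t _ y (by simp [PySem.Set.mem_update, Or.inr hy])
    · exact ih _ x hx y hy

-- KEY: folding the per-face update over a stream equals folding it over the stream's set
theorem pv_foldl_update_ofList (g : Int → List Int) :
    ∀ (l : List Int) (P : PySem.Set Int),
      l.foldl (fun np f => PySem.Set.update np (g f)) P
        = (PySem.Set.ofList l).foldl (fun np f => PySem.Set.update np (g f)) P := by
  intro l
  induction l using List.reverseRecOn with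
  | nil => intro P; rfl
  | append_singleton xs x ih =>
    intro P
    rw [PySem.Set.ofList_append_singleton, List.foldl_append]
    by_cases hx : x ∈ PySem.Set.ofList xs
    · have hxs : x ∈ xs := by simpa [PySem.Set.mem_ofList] using hx
      rw [PySem.Set.add_of_mem hx, ← ih]
      simp only [List.foldl_cons, List.foldl_nil]
      exact pv_update_of_subset _ _ (fun y hy => pv_pts_mem_foldl_update g xs P x hxs y hy)
    · rw [PySem.Set.add_of_not_mem hx, List.foldl_append, ← ih]

-- ===== VERDICT (by name: the statement is the Claim_ definition above) =====
theorem get_neighbour_data_py_spec : Claim_equal_get_neighbour_data_py := by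
  intro opi fl pl up uf _ _
  show get_neighbour_data_py opi fl pl up uf = _
  unfold get_neighbour_data_py get_neighbour_data_py_alt
  simp only [pv_foldl_ite_add]
  rw [pv_A_loop]
  rw [pv_foldl_nested_flat
        (fun point_idx => List.filter (fun item => !uf.contains item) ((PySem.Dict.ofList fl).getD point_idx []))
        (fun np face_idx =>
          PySem.Set.update np (List.filter (fun item => !up.contains item) ((PySem.Dict.ofList pl).getD face_idx [])))]
  rw [pv_foldl_update_flat
        (fun point_idx => List.filter (fun item => !uf.contains item) ((PySem.Dict.ofList fl).getD point_idx []))]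
  rw [pv_foldl_update_ofList
        (fun face_idx => List.filter (fun item => !up.contains item) ((PySem.Dict.ofList pl).getD face_idx []))]
  rfl
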